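-- pv_equiv track=rewrite | github.com/andy0716NTUT/IDS_APPAD | frontend/backend_api.py | _extract_failure_reason
-- ===== SOURCE A (Python) =====
-- def _extract_failure_reason(stderr_text: str, fallback: str = "main.py execution failed") -> str:
--     lines = [line.strip() for line in (stderr_text or "").splitlines() if line.strip()]
--     if not lines:
--         return fallback
--
--     for line in reversed(lines):
--         if "Feature scale consistency check failed" in line:
--             return line
--
--     for line in reversed(lines):
--         if line.startswith("ValueError:"):
--             return line
--
--     return lines[-1]
-- ===== SOURCE B (Python) =====
-- def _extract_failure_reason(stderr_text: str, fallback: str = "main.py execution failed") -> str: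
--     consistency = valerr = last = None
--     for raw in (stderr_text or "").splitlines():
--         line = raw.strip()
--         if not line:
--             continue
--         if "Feature scale consistency check failed" in line:
--             consistency = line
--         if line.startswith("ValueError:"):
--             valerr = line
--         last = line
--     for cand in (consistency, valerr, last):
--         if cand is not None:
--             return cand
--     return fallback
-- ===== Notes on version B (the rewrite author's own statement) =====
-- stated objective: simpler
-- what changed: Replaced the build-a-list-then-two-reversed-scans-plus-tail-lookup with a single forward pass that keeps the last line matching each priority test and the last line overall, choosing among the three candidates at the end.
import Mathlib
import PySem

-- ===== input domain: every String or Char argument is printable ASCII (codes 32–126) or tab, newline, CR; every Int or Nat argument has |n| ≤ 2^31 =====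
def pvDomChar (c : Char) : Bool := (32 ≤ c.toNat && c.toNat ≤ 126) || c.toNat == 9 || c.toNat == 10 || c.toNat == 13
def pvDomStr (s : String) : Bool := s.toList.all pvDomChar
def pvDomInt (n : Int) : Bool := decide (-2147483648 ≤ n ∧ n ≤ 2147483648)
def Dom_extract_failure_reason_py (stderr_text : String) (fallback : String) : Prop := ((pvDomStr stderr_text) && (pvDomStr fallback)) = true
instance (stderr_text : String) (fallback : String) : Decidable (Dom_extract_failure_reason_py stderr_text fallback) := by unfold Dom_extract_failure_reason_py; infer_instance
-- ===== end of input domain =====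

-- B replaces A's list-building plus two reversed scans and a tail lookup by one forward pass
-- keeping the three priority candidates (objective: simpler; return-value equivalence proved).


-- the two tests of A's two reversed scans (shared vocabulary of both ports)
def pvConsis (l : String) : Bool := PySem.Str.isIn "Feature scale consistency check failed" l
def pvValerr (l : String) : Bool := PySem.Str.startswith l "ValueError:"

-- ===== PORT A =====
-- lines = [line.strip() for line in (stderr_text or "").splitlines() if line.strip()];
-- two 'for line in reversed(lines): if …: return line' scans are reversed-list find?s.
def extract_failure_reason_py (stderr_text : String) (fallback : String) : String :=
  let lines := ((PySem.Str.splitlines stderr_text).map PySem.Str.strip).filter (fun l => !(l == ""))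
  if lines.isEmpty then fallback
  else
    match lines.reverse.find? pvConsis with
    | some l => l
    | none =>
      match lines.reverse.find? pvValerr with
      | some l => l
      | none => lines.getLastD fallback   -- lines[-1]; lines is nonempty here

-- ===== PORT B =====
-- one forward pass: last consistency match, last ValueError match, last line overall
def pvStep (st : Option String × Option String × Option String) (l : String) :
    Option String × Option String × Option String :=
  (if pvConsis l then some l else st.1,
   if pvValerr l then some l else st.2.1,
   some l)

def extract_failure_reason_py_alt (stderr_text : String) (fallback : String) : String :=
  let st := (PySem.Str.splitlines stderr_text).foldl
    (fun st raw =>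
      let l := PySem.Str.strip raw
      if l == "" then st else pvStep st l)
    (none, none, none)
  ((st.1.or st.2.1).or st.2.2).getD fallback

-- ===== PRECONDITION & SPEC =====
def Spec_extract_failure_reason_py (stderr_text : String) (fallback : String) (out : String) : Prop := out = extract_failure_reason_py_alt stderr_text fallback
instance (stderr_text : String) (fallback : String) (out : String) : Decidable (Spec_extract_failure_reason_py stderr_text fallback out) := by unfold Spec_extract_failure_reason_py; infer_instance

-- ===== CLAIM (what is proved, stated in full; the proofs are below) =====
def Claim_equal_extract_failure_reason_py : Prop := ∀ (stderr_text : String) (fallback : String), Dom_extract_failure_reason_py stderr_text fallback → Spec_extract_failure_reason_py stderr_text fallback (extract_failure_reason_py stderr_text fallback)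

-- ===== LEMMAS AND PROOFS =====

-- the fold keeps, in each slot, the LAST element satisfying its test (= first in the reversed list)
theorem pvStep_foldl (xs : List String) (init : Option String × Option String × Option String) :
    xs.foldl pvStep init
      = ((xs.reverse.find? pvConsis).or init.1,
         (xs.reverse.find? pvValerr).or init.2.1,
         xs.reverse.head?.or init.2.2) := by
  induction xs generalizing init with
  | nil => simp
  | cons x xs ih =>
    rw [List.foldl_cons, ih]
    cases hc : pvConsis x <;> cases hv : pvValerr x <;>
      simp [pvStep, hc, hv, List.find?_append]

-- B's raw fold over splitlines equals the fold of pvStep over A's filtered stripped lines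
theorem pvFold_eq (raws : List String) (init : Option String × Option String × Option String) :
    raws.foldl (fun st raw => let l := PySem.Str.strip raw; if l == "" then st else pvStep st l) init
      = ((raws.map PySem.Str.strip).filter (fun l => !(l == ""))).foldl pvStep init := by
  induction raws generalizing init with
  | nil => rfl
  | cons r raws ih =>
    by_cases h : PySem.Str.strip r = ""
    · simpa [h] using ih init
    · simpa [h] using ih (pvStep init (PySem.Str.strip r))

-- ===== VERDICT (by name: the statement is the Claim_ definition above) =====
theorem extract_failure_reason_py_spec : Claim_equal_extract_failure_reason_py := by
  intro s fb _
  unfold Spec_extract_failure_reason_py extract_failure_reason_py extract_failure_reason_py_alt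
  rw [pvFold_eq, pvStep_foldl]
  set lines := ((PySem.Str.splitlines s).map PySem.Str.strip).filter (fun l => !(l == "")) with hl
  rcases h : lines with _ | ⟨a, rest⟩
  · simp
  · simp only [List.isEmpty_cons, if_neg Bool.false_ne_true, Option.or_none]
    cases hc : (a :: rest).reverse.find? pvConsis with
    | some l => simp
    | none =>
      cases hv : (a :: rest).reverse.find? pvValerr with
      | some l => simp
      | none =>
        simp [List.head?_reverse, List.getLastD_eq_getLast?, List.getLast?_cons]
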